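-- pv_equiv track=rewrite | github.com/smallt-TAO/Reply-Deep-Learning | smalltao_research/social_network_visulization_grb/color_network/algorithm.py | matrix_alter
-- ===== SOURCE A (Python) =====
-- def matrix_alter(array_d, matrix):
--     # 放置环节
--     m = len(matrix)
--     matrix_v = [array_d[0]]
--     flag = True
--     for i in range(1, m):
--         if flag:
--             matrix_v.append(array_d[i])
--             flag = False
--         else:
--             matrix_v.insert(0, array_d[i])
--             flag = True
--     matrix_new = [([0] * m) for si in range(m)]
--     for i in range(m):
--         for j in range(m):
--             matrix_new[i][j] = matrix[matrix_v[i]][matrix_v[j]]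
--
--     return matrix_new
-- ===== SOURCE B (Python) =====
-- def matrix_alter(array_d, matrix):
--     m = len(matrix)
--     # zigzag permutation in closed form: evens 2,4,... reversed on the left,
--     # index 0 in the centre, odds 1,3,... on the right
--     order = (
--         list(reversed([array_d[i] for i in range(2, m, 2)]))
--         + [array_d[0]]
--         + [array_d[i] for i in range(1, m, 2)]
--     )
--     return [[matrix[order[i]][order[j]] for j in range(m)] for i in range(m)]
-- ===== Notes on version B (the rewrite author's own statement) =====
-- stated objective: simpler
-- what changed: B computes the zigzag permutation in closed form (reversed even-index slice ++ centre ++ odd-index slice) instead of A's alternating append/insert(0) loop, and builds the result with nested comprehensions instead of preallocating a zero matrix and mutating it in place.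
import Mathlib
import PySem

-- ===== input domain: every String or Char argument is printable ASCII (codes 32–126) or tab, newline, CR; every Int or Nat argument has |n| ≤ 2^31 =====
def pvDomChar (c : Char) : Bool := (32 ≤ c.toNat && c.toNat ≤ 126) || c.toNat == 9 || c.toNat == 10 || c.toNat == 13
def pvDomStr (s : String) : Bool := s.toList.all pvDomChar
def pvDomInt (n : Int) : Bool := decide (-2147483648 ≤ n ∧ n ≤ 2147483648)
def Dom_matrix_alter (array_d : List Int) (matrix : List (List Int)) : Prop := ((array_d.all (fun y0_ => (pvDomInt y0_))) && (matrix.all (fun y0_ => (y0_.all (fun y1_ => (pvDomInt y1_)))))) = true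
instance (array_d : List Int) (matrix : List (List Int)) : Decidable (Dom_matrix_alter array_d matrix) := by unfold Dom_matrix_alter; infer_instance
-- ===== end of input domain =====

-- B replaces A's alternating append/insert(0) loop by a closed-form zigzag permutation
-- (evens reversed ++ centre ++ odds) and builds the result by nested comprehensions
-- instead of preallocating and mutating; same return value wherever A returns.


-- ===== PORT A =====
def matrix_alter (array_d : List Int) (matrix : List (List Int)) : List (List Int) :=
  let m : Int := matrix.length
  -- matrix_v = [array_d[0]]; flag = True; for i in range(1, m): append / insert(0)
  let st : List Int × Bool :=
    (PySem.List.pyRange 1 m 1).foldl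
      (fun (s : List Int × Bool) i =>
        if s.2 then (s.1 ++ [PySem.List.pyGetD array_d i 0], false)
        else (PySem.List.insert s.1 0 (PySem.List.pyGetD array_d i 0), true))
      ([PySem.List.pyGetD array_d 0 0], true)
  let matrix_v := st.1
  -- matrix_new = [([0] * m) for si in range(m)]
  let init : List (List Int) :=
    (PySem.List.pyRange 0 m 1).map (fun _ => List.replicate matrix.length 0)
  -- for i in range(m): for j in range(m): matrix_new[i][j] = matrix[matrix_v[i]][matrix_v[j]]
  (PySem.List.pyRange 0 m 1).foldl
    (fun mn i =>
      PySem.List.pySetD mn i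
        ((PySem.List.pyRange 0 m 1).foldl
          (fun row j =>
            PySem.List.pySetD row j
              (PySem.List.pyGetD
                (PySem.List.pyGetD matrix (PySem.List.pyGetD matrix_v i 0) [])
                (PySem.List.pyGetD matrix_v j 0) 0))
          (PySem.List.pyGetD mn i [])))
    init

-- ===== PORT B =====
def matrix_alter_alt (array_d : List Int) (matrix : List (List Int)) : List (List Int) :=
  let m : Int := matrix.length
  -- order = reversed evens ++ [array_d[0]] ++ odds
  let order : List Int :=
    ((PySem.List.pyRange 2 m 2).map (fun i => PySem.List.pyGetD array_d i 0)).reverse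
      ++ [PySem.List.pyGetD array_d 0 0]
      ++ (PySem.List.pyRange 1 m 2).map (fun i => PySem.List.pyGetD array_d i 0)
  (PySem.List.pyRange 0 m 1).map (fun i =>
    (PySem.List.pyRange 0 m 1).map (fun j =>
      PySem.List.pyGetD
        (PySem.List.pyGetD matrix (PySem.List.pyGetD order i 0) [])
        (PySem.List.pyGetD order j 0) 0))

-- ===== PRECONDITION & SPEC =====
-- Pre_ excludes exactly the inputs on which the Python A raises IndexError: empty array_d,
-- fewer than len(matrix) entries in array_d, or an entry of array_d that is out of range
-- as an index into matrix or into the accessed row.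
def Pre_matrix_alter (array_d : List Int) (matrix : List (List Int)) : Prop :=
  array_d ≠ [] ∧ (matrix.length ≤ array_d.length ∨ matrix.length ≤ 1) ∧
  ∀ x ∈ array_d.take matrix.length, PySem.Raise.InRange matrix.length x ∧
    ∀ y ∈ array_d.take matrix.length,
      PySem.Raise.InRange (PySem.List.pyGetD matrix x []).length y
instance (array_d : List Int) (matrix : List (List Int)) : Decidable (Pre_matrix_alter array_d matrix) := by unfold Pre_matrix_alter; infer_instance

def pvWitness_matrix_alter : List Int × List (List Int) :=
  ([2, 0, 1], [[1, 2, 3], [4, 5, 6], [7, 8, 9]])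

def Spec_matrix_alter (array_d : List Int) (matrix : List (List Int)) (out : List (List Int)) : Prop := out = matrix_alter_alt array_d matrix
instance (array_d : List Int) (matrix : List (List Int)) (out : List (List Int)) : Decidable (Spec_matrix_alter array_d matrix out) := by unfold Spec_matrix_alter; infer_instance

-- ===== CLAIM (what is proved, stated in full; the proofs are below) =====
def Claim_equal_matrix_alter : Prop := ∀ (array_d : List Int) (matrix : List (List Int)), Dom_matrix_alter array_d matrix → Pre_matrix_alter array_d matrix → Spec_matrix_alter array_d matrix (matrix_alter array_d matrix)

-- ===== LEMMAS AND PROOFS =====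

-- list.insert(0, x) is cons
lemma insert_zero {α : Type} (l : List α) (x : α) : PySem.List.insert l 0 x = x :: l := by
  simp [PySem.List.insert, PySem.List.sliceIndices]

-- the zigzag loop of A, after processing i = 1 .. n, in closed form
lemma zig_loop (a : List Int) (n : Nat) :
    (PySem.List.pyRange 1 ((n : Int) + 1) 1).foldl
      (fun (s : List Int × Bool) i =>
        if s.2 then (s.1 ++ [PySem.List.pyGetD a i 0], false)
        else (PySem.List.insert s.1 0 (PySem.List.pyGetD a i 0), true))
      ([PySem.List.pyGetD a 0 0], true)
    = (((List.range (n / 2)).map (fun (k : Nat) => PySem.List.pyGetD a (2 + 2 * (k : Int)) 0)).reverse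
        ++ [PySem.List.pyGetD a 0 0]
        ++ (List.range ((n + 1) / 2)).map (fun (k : Nat) => PySem.List.pyGetD a (1 + 2 * (k : Int)) 0),
       decide (n % 2 = 0)) := by
  induction n with
  | zero => simp
  | succ n ih =>
    have hsplit : PySem.List.pyRange 1 ((n : Int) + 1 + 1) 1
        = PySem.List.pyRange 1 ((n : Int) + 1) 1 ++ [(n : Int) + 1] :=
      PySem.List.pyRange_one_succ_right (by omega)
    rw [show (((n+1 : Nat)) : Int) + 1 = ((n : Int) + 1) + 1 by push_cast; ring, hsplit,
      List.foldl_append, ih]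
    by_cases hpar : n % 2 = 0
    · -- flag is true: append a[n+1] on the right (n even)
      have hflag : (decide ((n+1) % 2 = 0)) = false := by simp; omega
      simp only [List.foldl_cons, List.foldl_nil, hpar, decide_true, if_true]
      have hO : (n + 1 + 1) / 2 = (n + 1) / 2 + 1 := by omega
      have hE : (n + 1) / 2 = n / 2 := by omega
      have hidx : (1 : Int) + 2 * ((n / 2 : Nat) : Int) = (n : Int) + 1 := by omega
      rw [hO, hE, List.range_succ, hflag]
      simp only [List.map_append, List.map_cons, List.map_nil, List.append_assoc, hidx]
    · -- flag is false: insert a[n+1] at the front (n odd)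
      have hflag : (decide ((n+1) % 2 = 0)) = true := by simp; omega
      simp only [List.foldl_cons, List.foldl_nil, hpar, decide_false, Bool.false_eq_true,
        if_false, insert_zero]
      have hE : (n + 1) / 2 = n / 2 + 1 := by omega
      have hO : (n + 1 + 1) / 2 = (n + 1) / 2 := by omega
      have hidx : (2 : Int) + 2 * ((n / 2 : Nat) : Int) = (n : Int) + 1 := by omega
      rw [hO, hE, List.range_succ, hflag]
      simp only [List.map_append, List.map_cons, List.map_nil, List.reverse_append,
        List.reverse_cons, List.reverse_nil, List.nil_append, List.cons_append,
        List.append_assoc, hidx]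

-- A's matrix_v equals B's order list
lemma mv_eq_order (a : List Int) (n : Nat) :
    ((PySem.List.pyRange 1 (n : Int) 1).foldl
      (fun (s : List Int × Bool) i =>
        if s.2 then (s.1 ++ [PySem.List.pyGetD a i 0], false)
        else (PySem.List.insert s.1 0 (PySem.List.pyGetD a i 0), true))
      ([PySem.List.pyGetD a 0 0], true)).1
    = ((PySem.List.pyRange 2 (n : Int) 2).map (fun i => PySem.List.pyGetD a i 0)).reverse
        ++ [PySem.List.pyGetD a 0 0]
        ++ (PySem.List.pyRange 1 (n : Int) 2).map (fun i => PySem.List.pyGetD a i 0) := by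
  cases n with
  | zero =>
    simp only [Nat.cast_zero]
    rw [PySem.List.pyRange_one_eq_nil (by omega),
        PySem.List.pyRange_of_pos 2 0 (by omega : (0:Int) < 2),
        PySem.List.pyRange_of_pos 1 0 (by omega : (0:Int) < 2)]
    norm_num
  | succ k =>
    rw [show (((k+1 : Nat)) : Int) = (k : Int) + 1 by push_cast; ring]
    rw [zig_loop a k]
    rw [PySem.List.pyRange_of_pos 2 ((k : Int) + 1) (by omega : (0:Int) < 2),
        PySem.List.pyRange_of_pos 1 ((k : Int) + 1) (by omega : (0:Int) < 2)]
    have hc1 : (if (2:Int) < (k : Int) + 1 then (((k : Int) + 1 - 2 + 2 - 1)/2).toNat else 0)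
        = k / 2 := by split_ifs <;> omega
    have hc2 : (if (1:Int) < (k : Int) + 1 then (((k : Int) + 1 - 1 + 2 - 1)/2).toNat else 0)
        = (k + 1) / 2 := by split_ifs <;> omega
    rw [hc1, hc2, List.map_map, List.map_map]
    congr 1

-- a left fold that sets positions k .. k+c-1 of a list of length k+c is take ++ map
lemma foldl_set_range {α : Type} (d : α) (g : Nat → α → α) :
    ∀ (c k : Nat) (row : List α), row.length = k + c →
      (List.range' k c).foldl (fun r j => r.set j (g j (r.getD j d))) row
        = row.take k ++ (List.range' k c).map (fun j => g j (row.getD j d)) := by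
  intro c
  induction c with
  | zero =>
    intro k row h
    simp only [List.range'_zero, List.foldl_nil, List.map_nil, List.append_nil]
    exact (List.take_of_length_le (by omega)).symm
  | succ c ih =>
    intro k row h
    rw [List.range'_succ]
    simp only [List.foldl_cons, List.map_cons]
    rw [ih (k+1) _ (by simp [h]; omega)]
    have hk : k < row.length := by omega
    have h1 : (row.set k (g k (row.getD k d))).take (k+1)
        = row.take k ++ [g k (row.getD k d)] := by
      rw [List.take_add_one, List.take_set_of_le (by omega)]
      simp [hk]
    have h2 : (List.range' (k+1) c).map
          (fun j => g j ((row.set k (g k (row.getD k d))).getD j d))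
        = (List.range' (k+1) c).map (fun j => g j (row.getD j d)) := by
      apply List.map_congr_left
      intro j hj
      have hkj : k ≠ j := by have := (List.mem_range'_1.mp hj).1; omega
      simp [List.getD, List.getElem?_set_ne hkj]
    rw [h1, h2]
    simp

lemma foldl_set_range0 {α : Type} (d : α) (g : Nat → α → α) (n : Nat) (row : List α)
    (h : row.length = n) :
    (List.range n).foldl (fun r j => r.set j (g j (r.getD j d))) row
      = (List.range n).map (fun j => g j (row.getD j d)) := by
  rw [List.range_eq_range']
  simpa using foldl_set_range d g n 0 row (by omega)

-- A's preallocate-and-assign rebuild equals B's nested map, for any entry function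
lemma rebuild (n : Nat) (f : Int → Int → Int) :
    (PySem.List.pyRange 0 (n : Int) 1).foldl
      (fun mn i => PySem.List.pySetD mn i
        ((PySem.List.pyRange 0 (n : Int) 1).foldl
          (fun row j => PySem.List.pySetD row j (f i j)) (PySem.List.pyGetD mn i [])))
      ((PySem.List.pyRange 0 (n : Int) 1).map (fun _ => List.replicate n (0 : Int)))
    = (PySem.List.pyRange 0 (n : Int) 1).map (fun i =>
        (PySem.List.pyRange 0 (n : Int) 1).map (fun j => f i j)) := by
  rw [PySem.List.pyRange_zero_natCast n]
  simp only [List.foldl_map, List.map_map, Function.comp_def, PySem.List.pySetD_natCast,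
    PySem.List.pyGetD_natCast]
  have hinner : ∀ (i : Int) (row : List Int), row.length = n →
      (List.range n).foldl (fun r (j : Nat) => r.set j (f i (j : Int))) row
        = (List.range n).map (fun (j : Nat) => f i (j : Int)) := by
    intro i row h
    simpa using foldl_set_range0 (0 : Int) (fun (j : Nat) _ => f i (j : Int)) n row h
  have houter := foldl_set_range0 ([] : List Int) (fun (i : Nat) r =>
      (List.range n).foldl (fun row (j : Nat) => row.set j (f (i : Int) (j : Int))) r) n
      ((List.range n).map (fun _ => List.replicate n (0 : Int))) (by simp)
  beta_reduce at houter
  rw [houter]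
  apply List.map_congr_left
  intro i hi
  have hin : i < n := List.mem_range.mp hi
  have hget : ((List.range n).map (fun _ => List.replicate n (0 : Int))).getD i []
      = List.replicate n 0 := by
    simp [List.getD, hin]
  rw [hget, hinner _ _ (by simp)]

-- ===== VERDICT (by name: the statement is the Claim_ definition above) =====
theorem matrix_alter_spec : Claim_equal_matrix_alter := by
  intro array_d matrix _ _
  unfold Spec_matrix_alter matrix_alter matrix_alter_alt
  simp only []
  rw [mv_eq_order array_d matrix.length]
  exact rebuild matrix.length _
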